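-- pv_equiv track=rewrite | github.com/Nghia03092004/nghia03092004.github.io | project_euler_unified/problem_487/solution.py | bernoulli_mod_p
-- ===== SOURCE A (Python) =====
-- def bernoulli_mod_p(k: int, p: int) -> list:
--     """Compute Bernoulli numbers B_0, B_1, ..., B_k modulo prime p."""
--     B = [0] * (k + 1)
--     B[0] = 1
--     for m in range(1, k + 1):
--         # B_m = -1/(m+1) * sum_{j=0}^{m-1} C(m+1,j) * B_j
--         s = 0
--         c = 1  # binomial coefficient C(m+1, j)
--         for j in range(m):
--             s = (s + c * B[j]) % p
--             c = c * (m + 1 - j) % p * pow(j + 1, p - 2, p) % p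
--         B[m] = (-(s) * pow(m + 1, p - 2, p)) % p
--     return B
-- ===== SOURCE B (Python) =====
-- def bernoulli_mod_p(k: int, p: int) -> list:
--     """Compute Bernoulli numbers B_0, B_1, ..., B_k modulo prime p.
--
--     The inner sum sum_j C(m+1,j)*B_j is evaluated as a backward Horner
--     scheme over the inverse-scaled values u_j = (1/j!)*B_j (mod p): no
--     binomial coefficient is ever formed, and the k+1 Fermat powers are
--     computed once up front instead of once per inner iteration.
--     """
--     q = [pow(i + 1, p - 2, p) for i in range(k + 1)]  # q[i] = (i+1)^(p-2) mod p
--     B = [1]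
--     u = [1]  # u[j] = G_j * B_j % p with G_j = q[0]*...*q[j-1] (= 1/j! for prime p)
--     g = 1
--     for m in range(1, k + 1):
--         h = 0
--         for j in range(m - 1, -1, -1):  # Horner: h = sum_j (m+1)...(m+2-j) * u_j
--             h = (u[j] + (m + 1 - j) * h) % p
--         b = -h * q[m] % p
--         B.append(b)
--         g = g * q[m - 1] % p
--         u.append(g * b % p)
--     return B
-- ===== Notes on version B (the rewrite author's own statement) =====
-- stated objective: faster
-- what changed: B never forms a binomial coefficient: it keeps inverse-scaled values u_j = (1/j!)*B_j (one batch of k+1 Fermat powers up front) and evaluates each defining sum by a backward Horner scheme h = (u_j + (m+1-j)*h) % p over j = m-1..0, so the inner loop carries a single accumulator and no modular exponentiation.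
-- outside the precondition, e.g. on bernoulli_mod_p(0, 0): A returns [1], B raises ValueError; on bernoulli_mod_p(3, -5): A returns [1, -2, 0, -2], B returns [1, -2, 0, -2]
import Mathlib
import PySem

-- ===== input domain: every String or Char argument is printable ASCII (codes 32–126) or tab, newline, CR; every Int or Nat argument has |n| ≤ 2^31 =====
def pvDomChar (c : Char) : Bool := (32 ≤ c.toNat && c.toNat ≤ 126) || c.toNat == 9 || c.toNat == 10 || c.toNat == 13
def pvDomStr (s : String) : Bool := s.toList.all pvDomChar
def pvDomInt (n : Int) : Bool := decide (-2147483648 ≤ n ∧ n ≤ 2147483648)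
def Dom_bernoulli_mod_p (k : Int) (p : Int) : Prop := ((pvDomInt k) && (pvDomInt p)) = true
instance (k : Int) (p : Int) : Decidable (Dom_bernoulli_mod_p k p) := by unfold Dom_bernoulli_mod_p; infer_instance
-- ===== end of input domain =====

-- B evaluates each defining sum by a backward Horner scheme over inverse-scaled values
-- u_j = G_j*B_j (one batch of Fermat powers up front), forming no binomial coefficient;
-- intended as faster (see the claim; a timing run result is the recorded label).


-- Python pow(b, e, m): PySem.Int.powMod for e ≥ 0; for e < 0 this helper returns 0, which is
-- Python's value exactly when m = 1 — the only e < 0 case reachable under Pre_ (namely p = 1).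
def pyPow3 (b e m : Int) : Int := if e < 0 then 0 else PySem.Int.powMod b e.toNat m

-- ===== PORT A =====
-- indices j, m come from range(...) so they are ≥ 0: .toNat is exact, pyGetD never defaults
def bernoulli_mod_p (k : Int) (p : Int) : List Int :=
  let B0 := (List.replicate (k + 1).toNat 0).set 0 1   -- B = [0]*(k+1); B[0] = 1 (k < 0: IndexError, outside Pre_)
  (PySem.List.pyRange 1 (k + 1) 1).foldl (fun B m =>
      let sc := (PySem.List.pyRange 0 m 1).foldl (fun (sc : Int × Int) j =>
          (PySem.Int.mod (sc.1 + sc.2 * PySem.List.pyGetD B j 0) p,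
           PySem.Int.mod (PySem.Int.mod (sc.2 * (m + 1 - j)) p * pyPow3 (j + 1) (p - 2) p) p))
        ((0 : Int), (1 : Int))
      B.set m.toNat (PySem.Int.mod (-sc.1 * pyPow3 (m + 1) (p - 2) p) p))
    B0

-- ===== PORT B =====
def bernoulli_mod_p_alt (k : Int) (p : Int) : List Int :=
  let q := (PySem.List.pyRange 0 (k + 1) 1).map (fun i => pyPow3 (i + 1) (p - 2) p)
  let st := (PySem.List.pyRange 1 (k + 1) 1).foldl
    (fun (st : List Int × List Int × Int) m =>
      let h := (PySem.List.pyRange (m - 1) (-1) (-1)).foldl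
        (fun h j => PySem.Int.mod (PySem.List.pyGetD st.2.1 j 0 + (m + 1 - j) * h) p) 0
      let b := PySem.Int.mod (-h * PySem.List.pyGetD q m 0) p
      let g := PySem.Int.mod (st.2.2 * PySem.List.pyGetD q (m - 1) 0) p
      (st.1 ++ [b], st.2.1 ++ [PySem.Int.mod (g * b) p], g))
    ([1], [1], 1)
  st.1

-- ===== PRECONDITION & SPEC =====
-- Pre_ is the function's documented domain, k ≥ 0 and modulus p ≥ 1: A raises IndexError for
-- k < 0 and ZeroDivisionError for p = 0 (k ≥ 1); for p < 0 A either raises ValueError (a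
-- non-invertible base in pow with negative exponent) or strays into Python's
-- negative-modulus pow, outside the docstring's 'prime p' (B returns the same values there
-- when it returns at all, except (k, p) = (0, p ≤ 0) where B's eager Fermat-power batch raises).
def Pre_bernoulli_mod_p (k : Int) (p : Int) : Prop := 0 ≤ k ∧ 1 ≤ p
instance (k : Int) (p : Int) : Decidable (Pre_bernoulli_mod_p k p) := by unfold Pre_bernoulli_mod_p; infer_instance
def pvWitness_bernoulli_mod_p : Int × Int := (5, 7)

def Spec_bernoulli_mod_p (k : Int) (p : Int) (out : List Int) : Prop := out = bernoulli_mod_p_alt k p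
instance (k : Int) (p : Int) (out : List Int) : Decidable (Spec_bernoulli_mod_p k p out) := by unfold Spec_bernoulli_mod_p; infer_instance

-- ===== CLAIM (what is proved, stated in full; the proofs are below) =====
def Claim_equal_bernoulli_mod_p : Prop := ∀ (k : Int) (p : Int), Dom_bernoulli_mod_p k p → Pre_bernoulli_mod_p k p → Spec_bernoulli_mod_p k p (bernoulli_mod_p k p)

-- ===== LEMMAS AND PROOFS =====

-- prefix products of the Fermat powers: Gf p j = 1/j! mod p (A's c and B's u both carry it)
def Gf (p : Int) : Nat → Int
  | 0 => 1
  | n + 1 => PySem.Int.mod (Gf p n * pyPow3 ((n : Int) + 1) (p - 2) p) p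

-- falling factorial (m+1)(m)…(m+2-j): the weight both inner loops give the j-th term
def FFn (m : Int) : Nat → Int
  | 0 => 1
  | j + 1 => FFn m j * (m + 1 - (j : Int))

lemma set_append_cons {A C : List Int} (b v : Int) :
    (A ++ b :: C).set A.length v = A ++ v :: C := by simp

lemma modeq_emod_self {p x : Int} : Int.ModEq p (x % p) x :=
  Int.emod_emod_of_dvd x dvd_rfl

-- congruent summands give congruent sums
lemma sum_modeq (p : Int) (n : Nat) (a b : Nat → Int)
    (h : ∀ j, j < n → Int.ModEq p (a j) (b j)) :
    Int.ModEq p (∑ j ∈ Finset.range n, a j) (∑ j ∈ Finset.range n, b j) := by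
  induction n with
  | zero => simp
  | succ n ih =>
    rw [Finset.sum_range_succ, Finset.sum_range_succ]
    exact (ih fun j hj => h j (by omega)).add (h n (by omega))

-- a fold whose every step ends in % p stays in [0, p) once one step has run
lemma foldl_range_mem (p : Int) (hp : 0 < p) (f : Int → Int → Int) (g : Int → Int → Int)
    (hf : ∀ a x, f a x = g a x % p) :
    ∀ (l : List Int) (a : Int), l ≠ [] → 0 ≤ l.foldl f a ∧ l.foldl f a < p := by
  intro l
  induction l with
  | nil => intro a h; exact absurd rfl h
  | cons x xs ih =>
    intro a _
    cases xs with
    | nil => simp [hf]; exact ⟨Int.emod_nonneg _ (by omega), Int.emod_lt_of_pos _ hp⟩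
    | cons y ys => exact ih (f a x) (by simp)

-- same, for the first component of A's pair-state inner fold
lemma foldl_pair_fst_mem (p : Int) (hp : 0 < p) (f : Int × Int → Int → Int × Int)
    (g : Int × Int → Int → Int)
    (hf : ∀ a x, (f a x).1 = g a x % p) :
    ∀ (l : List Int) (a : Int × Int), l ≠ [] → 0 ≤ (l.foldl f a).1 ∧ (l.foldl f a).1 < p := by
  intro l
  induction l with
  | nil => intro a h; exact absurd rfl h
  | cons x xs ih =>
    intro a _
    cases xs with
    | nil => simp [hf]; exact ⟨Int.emod_nonneg _ (by omega), Int.emod_lt_of_pos _ hp⟩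
    | cons y ys => exact ih (f a x) (by simp)

-- A's ascending inner loop: s ≡ Σ FFn j · Gf j · v j and c ≡ FFn n · Gf n (mod p)
lemma ascending (p m : Int) (hp : 0 < p) (v : Int → Int) (n : Nat) :
    Int.ModEq p
      (((List.range n).map (fun t : Nat => (t : Int))).foldl
        (fun (sc : Int × Int) j => ((sc.1 + sc.2 * v j) % p,
          ((sc.2 * (m + 1 - j)) % p * pyPow3 (j + 1) (p - 2) p) % p)) (0, 1)).1
      (∑ j ∈ Finset.range n, FFn m j * Gf p j * v j)
    ∧ Int.ModEq p
      (((List.range n).map (fun t : Nat => (t : Int))).foldl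
        (fun (sc : Int × Int) j => ((sc.1 + sc.2 * v j) % p,
          ((sc.2 * (m + 1 - j)) % p * pyPow3 (j + 1) (p - 2) p) % p)) (0, 1)).2
      (FFn m n * Gf p n) := by
  induction n with
  | zero => constructor <;> simp [FFn, Gf]
  | succ n ih =>
    obtain ⟨ih1, ih2⟩ := ih
    rw [List.range_succ, List.map_append] at *
    simp only [List.foldl_append, List.map_cons, List.map_nil, List.foldl_cons, List.foldl_nil] at *
    set a := ((List.range n).map (fun t : Nat => (t : Int))).foldl
        (fun (sc : Int × Int) j => ((sc.1 + sc.2 * v j) % p,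
          ((sc.2 * (m + 1 - j)) % p * pyPow3 (j + 1) (p - 2) p) % p)) (0, 1) with ha
    constructor
    · show Int.ModEq p ((a.1 + a.2 * v (n : Int)) % p) _
      rw [Finset.sum_range_succ]
      exact modeq_emod_self.trans (ih1.add (ih2.mul_right _))
    · show Int.ModEq p (((a.2 * (m + 1 - (n : Int))) % p * pyPow3 ((n : Int) + 1) (p - 2) p) % p)
        (FFn m (n + 1) * Gf p (n + 1))
      have hc : Int.ModEq p ((a.2 * (m + 1 - (n : Int))) % p * pyPow3 ((n : Int) + 1) (p - 2) p)
          (FFn m n * Gf p n * (m + 1 - (n : Int)) * pyPow3 ((n : Int) + 1) (p - 2) p) :=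
        (modeq_emod_self.trans (ih2.mul_right _)).mul_right _
      refine modeq_emod_self.trans (hc.trans ?_)
      have hGf : Gf p (n + 1) = (Gf p n * pyPow3 ((n : Int) + 1) (p - 2) p) % p := by
        simp [Gf, PySem.Int.mod_eq_emod_of_pos hp]
      have : Int.ModEq p (FFn m (n + 1) * Gf p (n + 1))
          (FFn m (n + 1) * (Gf p n * pyPow3 ((n : Int) + 1) (p - 2) p)) := by
        rw [hGf]; exact modeq_emod_self.mul_left _
      refine (this.trans ?_).symm
      have : FFn m (n + 1) * (Gf p n * pyPow3 ((n : Int) + 1) (p - 2) p)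
          = FFn m n * Gf p n * (m + 1 - (n : Int)) * pyPow3 ((n : Int) + 1) (p - 2) p := by
        simp [FFn]; ring
      rw [this]

-- B's backward Horner loop, fully general in the start accumulator
lemma horner (p m : Int) (u : Int → Int) :
    ∀ (t : Nat) (a : Int),
      Int.ModEq p
        (((List.range t).map (fun k : Nat => (t : Int) - 1 - k)).foldl
          (fun h j => (u j + (m + 1 - j) * h) % p) a)
        ((∑ j ∈ Finset.range t, FFn m j * u j) + FFn m t * a) := by
  intro t
  induction t with
  | zero => intro a; simp [FFn]
  | succ t ih =>
    intro a
    have hlist : (List.range (t + 1)).map (fun k : Nat => ((t : Int) + 1) - 1 - k)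
        = (t : Int) :: (List.range t).map (fun k : Nat => (t : Int) - 1 - k) := by
      rw [List.range_succ_eq_map, List.map_cons, List.map_map]
      refine congrArg₂ _ (by norm_num) (List.map_congr_left ?_)
      intro k _; simp [Function.comp]; ring
    have hcast : ((t + 1 : Nat) : Int) = (t : Int) + 1 := by push_cast; ring
    rw [hcast, hlist, List.foldl_cons]
    have h1 := ih ((u (t : Int) + (m + 1 - (t : Int)) * a) % p)
    refine h1.trans ?_
    have h2 : Int.ModEq p (FFn m t * ((u (t : Int) + (m + 1 - (t : Int)) * a) % p))
        (FFn m t * u (t : Int) + FFn m (t + 1) * a) := by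
      have := (modeq_emod_self (p := p) (x := u (t : Int) + (m + 1 - (t : Int)) * a)).mul_left (FFn m t)
      refine this.trans ?_
      have : FFn m t * (u (t : Int) + (m + 1 - (t : Int)) * a)
          = FFn m t * u (t : Int) + FFn m (t + 1) * a := by simp [FFn]; ring
      rw [this]
    calc (∑ j ∈ Finset.range t, FFn m j * u j) + FFn m t * ((u (t : Int) + (m + 1 - (t : Int)) * a) % p)
        ≡ (∑ j ∈ Finset.range t, FFn m j * u j) + (FFn m t * u (t : Int) + FFn m (t + 1) * a) [ZMOD p] :=
          h2.add_left _
      _ = (∑ j ∈ Finset.range (t + 1), FFn m j * u j) + FFn m (t + 1) * a := by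
          rw [Finset.sum_range_succ]; ring

-- proof-side names for the two outer-loop bodies (definitionally the ports' lambdas)
def bStepA (p : Int) (B : List Int) (m : Int) : List Int :=
  let sc := (PySem.List.pyRange 0 m 1).foldl (fun (sc : Int × Int) j =>
      (PySem.Int.mod (sc.1 + sc.2 * PySem.List.pyGetD B j 0) p,
       PySem.Int.mod (PySem.Int.mod (sc.2 * (m + 1 - j)) p * pyPow3 (j + 1) (p - 2) p) p))
    ((0 : Int), (1 : Int))
  B.set m.toNat (PySem.Int.mod (-sc.1 * pyPow3 (m + 1) (p - 2) p) p)

def bStepB (q : List Int) (p : Int) (st : List Int × List Int × Int) (m : Int) :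
    List Int × List Int × Int :=
  let h := (PySem.List.pyRange (m - 1) (-1) (-1)).foldl
    (fun h j => PySem.Int.mod (PySem.List.pyGetD st.2.1 j 0 + (m + 1 - j) * h) p) 0
  let b := PySem.Int.mod (-h * PySem.List.pyGetD q m 0) p
  let g := PySem.Int.mod (st.2.2 * PySem.List.pyGetD q (m - 1) 0) p
  (st.1 ++ [b], st.2.1 ++ [PySem.Int.mod (g * b) p], g)

-- the outer loops in lockstep: A's set-based list is B's appended list padded with zeros,
-- B's third component is Gf, and B's u-entries are congruent to Gf j times the B-values
lemma outer_inv (p : Int) (hp1 : 1 ≤ p) (N : Nat) (q : List Int)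
    (hq : ∀ i : Int, 0 ≤ i → i < (N : Int) + 1 →
      PySem.List.pyGetD q i 0 = pyPow3 (i + 1) (p - 2) p) :
    ∀ t : Nat, t ≤ N →
    (PySem.List.pyRange 1 ((t : Int) + 1) 1).foldl (bStepA p) (1 :: List.replicate N 0)
      = ((PySem.List.pyRange 1 ((t : Int) + 1) 1).foldl (bStepB q p) ([1], [1], 1)).1
        ++ List.replicate (N - t) 0
    ∧ ((PySem.List.pyRange 1 ((t : Int) + 1) 1).foldl (bStepB q p) ([1], [1], 1)).1.length = t + 1
    ∧ ((PySem.List.pyRange 1 ((t : Int) + 1) 1).foldl (bStepB q p) ([1], [1], 1)).2.1.length = t + 1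
    ∧ ((PySem.List.pyRange 1 ((t : Int) + 1) 1).foldl (bStepB q p) ([1], [1], 1)).2.2 = Gf p t
    ∧ ∀ j : Nat, j < t + 1 →
        Int.ModEq p
          (((PySem.List.pyRange 1 ((t : Int) + 1) 1).foldl (bStepB q p) ([1], [1], 1)).2.1.getD j 0)
          (Gf p j *
            (((PySem.List.pyRange 1 ((t : Int) + 1) 1).foldl (bStepB q p) ([1], [1], 1)).1.getD j 0)) := by
  intro t
  induction t with
  | zero =>
    intro _
    simp only [Nat.cast_zero, zero_add]
    rw [PySem.List.pyRange_one_eq_nil le_rfl]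
    refine ⟨by simp, by simp, by simp, by simp [Gf], ?_⟩
    intro j hj
    interval_cases j
    simp [Gf]
  | succ t ih =>
    intro ht
    obtain ⟨hAB, hlB, hlU, hg, hu⟩ := ih (by omega)
    have hp0 : (0 : Int) < p := hp1
    have hpeel : PySem.List.pyRange 1 (((t + 1 : Nat) : Int) + 1) 1
        = PySem.List.pyRange 1 ((t : Int) + 1) 1 ++ [(t : Int) + 1] := by
      have h1 : ((t + 1 : Nat) : Int) + 1 = ((t : Int) + 1) + 1 := by push_cast; ring
      rw [h1, PySem.List.pyRange_one_succ_right (by omega)]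
    simp only [hpeel, List.foldl_append, List.foldl_cons, List.foldl_nil]
    set SB := (PySem.List.pyRange 1 ((t : Int) + 1) 1).foldl (bStepB q p) ([1], [1], 1) with hSB
    rw [hAB]
    simp only [bStepA, bStepB]
    simp only [PySem.Int.mod_eq_emod_of_pos hp0]
    have hmt : ((t : Int) + 1).toNat = t + 1 := by omega
    -- A's inner loop, reads reduced to SB.1 and the range normalised
    have hA1 : (PySem.List.pyRange 0 ((t : Int) + 1) 1).foldl
        (fun (sc : Int × Int) j =>
          ((sc.1 + sc.2 * PySem.List.pyGetD (SB.1 ++ List.replicate (N - t) 0) j 0) % p,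
           ((sc.2 * ((t : Int) + 1 + 1 - j)) % p * pyPow3 (j + 1) (p - 2) p) % p))
        ((0 : Int), (1 : Int))
        = ((List.range (t + 1)).map (fun s : Nat => (s : Int))).foldl
        (fun (sc : Int × Int) j =>
          ((sc.1 + sc.2 * PySem.List.pyGetD SB.1 j 0) % p,
           ((sc.2 * ((t : Int) + 1 + 1 - j)) % p * pyPow3 (j + 1) (p - 2) p) % p))
        ((0 : Int), (1 : Int)) := by
      rw [PySem.List.foldl_congr_mem _ _
        (fun (sc : Int × Int) j =>
          ((sc.1 + sc.2 * PySem.List.pyGetD SB.1 j 0) % p,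
           ((sc.2 * ((t : Int) + 1 + 1 - j)) % p * pyPow3 (j + 1) (p - 2) p) % p)) _ ?_]
      · rw [PySem.List.pyRange_one]
        simp only [sub_zero, hmt, zero_add]
      · intro acc x hx
        rw [PySem.List.mem_pyRange_one] at hx
        have hget : PySem.List.pyGetD (SB.1 ++ List.replicate (N - t) 0) x 0
            = PySem.List.pyGetD SB.1 x 0 := by
          rw [PySem.List.pyGetD_of_nonneg _ _ hx.1, PySem.List.pyGetD_of_nonneg _ _ hx.1]
          exact List.getD_append _ _ _ _ (by rw [hlB]; omega)
        rw [hget]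
    rw [hA1]
    have hasc := ascending p ((t : Int) + 1) hp0 (fun j => PySem.List.pyGetD SB.1 j 0) (t + 1)
    -- B's inner Horner loop normalised
    have hlist2 : PySem.List.pyRange ((t : Int) + 1 - 1) (-1) (-1)
        = (List.range (t + 1)).map (fun k : Nat => ((t + 1 : Nat) : Int) - 1 - k) := by
      rw [PySem.List.pyRange_neg_one]
      have h1 : ((t : Int) + 1 - 1 - (-1)).toNat = t + 1 := by omega
      rw [h1]
      apply List.map_congr_left
      intro k _
      push_cast
      ring
    rw [hlist2]
    have hhor := horner p ((t : Int) + 1) (fun j => PySem.List.pyGetD SB.2.1 j 0) (t + 1) 0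
    simp only [mul_zero, add_zero] at hhor
    -- the two inner results are congruent …
    have hbr : Int.ModEq p
        (∑ j ∈ Finset.range (t + 1), FFn ((t : Int) + 1) j * PySem.List.pyGetD SB.2.1 j 0)
        (∑ j ∈ Finset.range (t + 1), FFn ((t : Int) + 1) j * Gf p j * PySem.List.pyGetD SB.1 j 0) := by
      apply sum_modeq
      intro j hj
      have huj := hu j (by omega)
      have h1 : PySem.List.pyGetD SB.2.1 (j : Int) 0 = SB.2.1.getD j 0 := by
        simp [PySem.List.pyGetD_natCast]
      have h2 : PySem.List.pyGetD SB.1 (j : Int) 0 = SB.1.getD j 0 := by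
        simp [PySem.List.pyGetD_natCast]
      rw [h1, h2]
      calc FFn ((t : Int) + 1) j * SB.2.1.getD j 0
          ≡ FFn ((t : Int) + 1) j * (Gf p j * SB.1.getD j 0) [ZMOD p] := huj.mul_left _
        _ = FFn ((t : Int) + 1) j * Gf p j * SB.1.getD j 0 := by ring
    -- … and both lie in [0, p), hence are equal
    have hbA := foldl_pair_fst_mem p hp0
      (fun (sc : Int × Int) j =>
        ((sc.1 + sc.2 * PySem.List.pyGetD SB.1 j 0) % p,
         ((sc.2 * ((t : Int) + 1 + 1 - j)) % p * pyPow3 (j + 1) (p - 2) p) % p))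
      (fun sc j => sc.1 + sc.2 * PySem.List.pyGetD SB.1 j 0)
      (fun a x => rfl)
      ((List.range (t + 1)).map (fun s : Nat => (s : Int))) ((0 : Int), (1 : Int)) (by simp)
    have hbB := foldl_range_mem p hp0
      (fun h j => (PySem.List.pyGetD SB.2.1 j 0 + ((t : Int) + 1 + 1 - j) * h) % p)
      (fun h j => PySem.List.pyGetD SB.2.1 j 0 + ((t : Int) + 1 + 1 - j) * h)
      (fun a x => rfl)
      ((List.range (t + 1)).map (fun k : Nat => ((t + 1 : Nat) : Int) - 1 - k)) 0 (by simp)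
    have hmod : Int.ModEq p
        ((((List.range (t + 1)).map (fun s : Nat => (s : Int))).foldl
          (fun (sc : Int × Int) j =>
            ((sc.1 + sc.2 * PySem.List.pyGetD SB.1 j 0) % p,
             ((sc.2 * ((t : Int) + 1 + 1 - j)) % p * pyPow3 (j + 1) (p - 2) p) % p))
          ((0 : Int), (1 : Int))).1)
        (((List.range (t + 1)).map (fun k : Nat => ((t + 1 : Nat) : Int) - 1 - k)).foldl
          (fun h j => (PySem.List.pyGetD SB.2.1 j 0 + ((t : Int) + 1 + 1 - j) * h) % p) 0) :=
      hasc.1.trans ((hhor.trans hbr).symm)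
    have hsEq : (((List.range (t + 1)).map (fun s : Nat => (s : Int))).foldl
          (fun (sc : Int × Int) j =>
            ((sc.1 + sc.2 * PySem.List.pyGetD SB.1 j 0) % p,
             ((sc.2 * ((t : Int) + 1 + 1 - j)) % p * pyPow3 (j + 1) (p - 2) p) % p))
          ((0 : Int), (1 : Int))).1
        = ((List.range (t + 1)).map (fun k : Nat => ((t + 1 : Nat) : Int) - 1 - k)).foldl
          (fun h j => (PySem.List.pyGetD SB.2.1 j 0 + ((t : Int) + 1 + 1 - j) * h) % p) 0 := by
      unfold Int.ModEq at hmod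
      rw [Int.emod_eq_of_lt hbA.1 hbA.2, Int.emod_eq_of_lt hbB.1 hbB.2] at hmod
      exact hmod
    rw [hsEq]
    -- the q lookups
    have hq1 : PySem.List.pyGetD q ((t : Int) + 1) 0 = pyPow3 ((t : Int) + 1 + 1) (p - 2) p :=
      hq ((t : Int) + 1) (by omega) (by omega)
    have hq2 : PySem.List.pyGetD q ((t : Int) + 1 - 1) 0 = pyPow3 ((t : Int) + 1 - 1 + 1) (p - 2) p :=
      hq ((t : Int) + 1 - 1) (by omega) (by omega)
    rw [hq1, hq2]
    have hgf : ((Gf p t * pyPow3 ((t : Int) + 1 - 1 + 1) (p - 2) p) % p) = Gf p (t + 1) := by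
      have : (t : Int) + 1 - 1 + 1 = (t : Int) + 1 := by ring
      rw [this]
      simp [Gf, PySem.Int.mod_eq_emod_of_pos hp0]
    rw [hg, hgf]
    refine ⟨?_, by simp [hlB], by simp [hlU], rfl, ?_⟩
    · rw [hmt, show N - t = (N - (t + 1)) + 1 from by omega, List.replicate_succ,
        show t + 1 = SB.1.length from hlB.symm, set_append_cons]
      simp
    · intro j hj
      by_cases hjt : j < t + 1
      · have e1 : (SB.2.1 ++ [(Gf p (t + 1) *
            (-(((List.range (t + 1)).map (fun k : Nat => ((t + 1 : Nat) : Int) - 1 - k)).foldl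
              (fun h j => (PySem.List.pyGetD SB.2.1 j 0 + ((t : Int) + 1 + 1 - j) * h) % p) 0)
              * pyPow3 ((t : Int) + 1 + 1) (p - 2) p % p)) % p]).getD j 0 = SB.2.1.getD j 0 :=
          List.getD_append _ _ _ _ (by rw [hlU]; omega)
        have e2 : (SB.1 ++ [-(((List.range (t + 1)).map (fun k : Nat => ((t + 1 : Nat) : Int) - 1 - k)).foldl
              (fun h j => (PySem.List.pyGetD SB.2.1 j 0 + ((t : Int) + 1 + 1 - j) * h) % p) 0)
              * pyPow3 ((t : Int) + 1 + 1) (p - 2) p % p]).getD j 0 = SB.1.getD j 0 :=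
          List.getD_append _ _ _ _ (by rw [hlB]; omega)
        rw [e1, e2]
        exact hu j hjt
      · have hje : j = t + 1 := by omega
        subst hje
        rw [show t + 1 = SB.2.1.length from hlU.symm]
        rw [List.getD_append_right _ _ _ _ le_rfl]
        rw [show SB.2.1.length = SB.1.length from by rw [hlU, hlB]]
        rw [List.getD_append_right _ _ _ _ le_rfl]
        simp only [Nat.sub_self, List.getD_cons_zero]
        exact modeq_emod_self.trans (Int.ModEq.refl _)

-- ===== VERDICT (by name: the statement is the Claim_ definition above) =====
theorem bernoulli_mod_p_spec : Claim_equal_bernoulli_mod_p := by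
  intro k p _ hpre
  obtain ⟨hk, hp1⟩ := hpre
  unfold Spec_bernoulli_mod_p
  lift k to Nat using hk with N
  have hA : bernoulli_mod_p (N : Int) p
      = (PySem.List.pyRange 1 ((N : Int) + 1) 1).foldl (bStepA p)
          ((List.replicate ((N : Int) + 1).toNat 0).set 0 1) := rfl
  have hB : bernoulli_mod_p_alt (N : Int) p
      = ((PySem.List.pyRange 1 ((N : Int) + 1) 1).foldl
          (bStepB ((PySem.List.pyRange 0 ((N : Int) + 1) 1).map
            (fun i => pyPow3 (i + 1) (p - 2) p)) p) ([1], [1], 1)).1 := rfl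
  rw [hA, hB]
  have hB0 : (List.replicate ((N : Int) + 1).toNat 0).set 0 1
      = (1 : Int) :: List.replicate N 0 := by
    have : ((N : Int) + 1).toNat = N + 1 := by omega
    rw [this, List.replicate_succ, List.set_cons_zero]
  rw [hB0]
  have hq : ∀ i : Int, 0 ≤ i → i < (N : Int) + 1 →
      PySem.List.pyGetD ((PySem.List.pyRange 0 ((N : Int) + 1) 1).map
        (fun i => pyPow3 (i + 1) (p - 2) p)) i 0 = pyPow3 (i + 1) (p - 2) p := by
    intro i h0 h1
    rw [PySem.List.pyGetD_map_pyRange_of_nonneg _ _ i 0 h0 h1]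
  have := (outer_inv p hp1 N _ hq N le_rfl).1
  simpa using this
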